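-- pv_equiv track=rewrite | github.com/kangthink/articulate-qqq | lib/context.py | extract_heading_context
-- ===== SOURCE A (Python) =====
-- def extract_heading_context(lines: list[str], marker_line_idx: int) -> str:
--     """Extract parent headings (markdown) for hierarchical context.
--
--     Walks upward from the marker to find enclosing headings,
--     providing structural context.
--     """
--     headings = []
--     for i in range(marker_line_idx - 1, -1, -1):
--         stripped = lines[i].strip()
--         if stripped.startswith("#"):
--             headings.append(stripped)
--             # Stop at top-level heading
--             if stripped.startswith("# ") and not stripped.startswith("## "):
--                 break
--
--     headings.reverse()
--     return "\n".join(headings) if headings else ""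
-- ===== SOURCE B (Python) =====
-- def extract_heading_context(lines: list[str], marker_line_idx: int) -> str:
--     """Forward scan: keep headings since the most recent top-level heading."""
--     headings = []
--     for i in range(marker_line_idx):
--         stripped = lines[i].strip()
--         if stripped.startswith("#"):
--             if stripped.startswith("# ") and not stripped.startswith("## "):
--                 headings = [stripped]
--             else:
--                 headings.append(stripped)
--     return "\n".join(headings)
-- ===== Notes on version B (the rewrite author's own statement) =====
-- stated objective: simpler
-- what changed: Replaces the backward walk with early break plus a final reverse by a single forward scan that resets the accumulator at each top-level heading, so no break and no reverse are needed.
import Mathlib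
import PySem

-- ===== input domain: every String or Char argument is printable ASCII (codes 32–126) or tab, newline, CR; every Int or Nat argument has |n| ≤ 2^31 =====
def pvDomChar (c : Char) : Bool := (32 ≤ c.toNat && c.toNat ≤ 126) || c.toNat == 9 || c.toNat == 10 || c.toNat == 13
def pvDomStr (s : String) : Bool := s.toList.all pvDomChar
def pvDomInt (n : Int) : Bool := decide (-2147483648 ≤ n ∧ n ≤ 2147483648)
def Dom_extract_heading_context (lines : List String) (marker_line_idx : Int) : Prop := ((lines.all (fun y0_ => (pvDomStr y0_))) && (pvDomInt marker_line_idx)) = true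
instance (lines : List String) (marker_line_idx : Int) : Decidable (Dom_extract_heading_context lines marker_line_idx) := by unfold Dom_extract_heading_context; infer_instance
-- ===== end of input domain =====

-- B replaces A's backward walk + break + final reverse by one forward scan that
-- resets the accumulator at each top-level heading (objective: simpler).

-- ===== PORT A =====
-- A's backward loop with break, over range(marker_line_idx-1, -1, -1); break = return acc.
def pvLoopA (lines : List String) : List Int → List String → List String
  | [], acc => acc
  | i :: rest, acc =>
    let stripped := PySem.Str.strip ((PySem.List.pyGet? lines i).getD "")
    if PySem.Str.startswith stripped "#" then
      let acc' := acc ++ [stripped]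
      if PySem.Str.startswith stripped "# " && !(PySem.Str.startswith stripped "## ") then
        acc'
      else
        pvLoopA lines rest acc'
    else
      pvLoopA lines rest acc

def extract_heading_context (lines : List String) (marker_line_idx : Int) : String :=
  let headings := (pvLoopA lines (PySem.List.pyRange (marker_line_idx - 1) (-1) (-1)) []).reverse
  if headings ≠ [] then PySem.Str.join "\n" headings else ""

-- ===== PORT B =====
-- B's forward loop over range(marker_line_idx).
def pvStepB (lines : List String) (acc : List String) (i : Int) : List String :=
  let stripped := PySem.Str.strip ((PySem.List.pyGet? lines i).getD "")
  if PySem.Str.startswith stripped "#" then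
    if PySem.Str.startswith stripped "# " && !(PySem.Str.startswith stripped "## ") then
      [stripped]
    else
      acc ++ [stripped]
  else
    acc

def extract_heading_context_alt (lines : List String) (marker_line_idx : Int) : String :=
  PySem.Str.join "\n" ((PySem.List.pyRange 0 marker_line_idx 1).foldl (pvStepB lines) [])

-- ===== PRECONDITION & SPEC =====
-- A (and B) raise IndexError when marker_line_idx exceeds the number of lines; exactly those inputs are excluded.
def Pre_extract_heading_context (lines : List String) (marker_line_idx : Int) : Prop :=
  marker_line_idx ≤ (lines.length : Int)
instance (lines : List String) (marker_line_idx : Int) : Decidable (Pre_extract_heading_context lines marker_line_idx) := by unfold Pre_extract_heading_context; infer_instance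

def pvWitness_extract_heading_context : List String × Int := (["# A", "## B", "text"], 3)

def Spec_extract_heading_context (lines : List String) (marker_line_idx : Int) (out : String) : Prop := out = extract_heading_context_alt lines marker_line_idx
instance (lines : List String) (marker_line_idx : Int) (out : String) : Decidable (Spec_extract_heading_context lines marker_line_idx out) := by unfold Spec_extract_heading_context; infer_instance

-- ===== CLAIM (what is proved, stated in full; the proofs are below) =====
def Claim_equal_extract_heading_context : Prop := ∀ (lines : List String) (marker_line_idx : Int), Dom_extract_heading_context lines marker_line_idx → Pre_extract_heading_context lines marker_line_idx → Spec_extract_heading_context lines marker_line_idx (extract_heading_context lines marker_line_idx)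

-- ===== LEMMAS AND PROOFS =====

-- A's loop with the break, processed over any index list, accumulator pulled out.
theorem pvLoopA_acc (lines : List String) (idxs : List Int) (acc : List String) :
    pvLoopA lines idxs acc = acc ++ pvLoopA lines idxs [] := by
  induction idxs generalizing acc with
  | nil => simp [pvLoopA]
  | cons i rest ih =>
    simp only [pvLoopA]
    split_ifs with h1 h2
    · simp
    · rw [ih (acc ++ _), ih ([] ++ _)]; simp
    · rw [ih acc]

-- Core: running A's break-loop on the REVERSE of an index list and reversing the
-- result equals B's forward fold over that index list.
theorem pvLoopA_reverse_eq_foldB (lines : List String) (idxs : List Int) :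
    (pvLoopA lines idxs.reverse []).reverse = idxs.foldl (pvStepB lines) [] := by
  induction idxs using List.reverseRecOn with
  | nil => simp [pvLoopA]
  | append_singleton rest i ih =>
    rw [List.reverse_append, List.reverse_singleton, List.singleton_append,
        List.foldl_append, List.foldl_cons, List.foldl_nil]
    simp only [pvLoopA, pvStepB]
    split_ifs with h1 h2
    · simp
    · rw [List.nil_append, pvLoopA_acc]
      simp [ih]
    · exact ih

theorem extract_heading_context_spec' (lines : List String) (marker_line_idx : Int) :
    extract_heading_context lines marker_line_idx = extract_heading_context_alt lines marker_line_idx := by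
  unfold extract_heading_context extract_heading_context_alt
  have hr : PySem.List.pyRange (marker_line_idx - 1) (-1) (-1)
      = (PySem.List.pyRange 0 marker_line_idx 1).reverse := by
    rw [PySem.List.pyRange_neg_one_eq_reverse]
    norm_num
  rw [hr, pvLoopA_reverse_eq_foldB]
  by_cases h : List.foldl (pvStepB lines) [] (PySem.List.pyRange 0 marker_line_idx 1) = []
  · simp only [h, ne_eq, not_true_eq_false, if_false]
    rfl
  · simp only [h, ne_eq, not_false_eq_true, if_true]

-- ===== VERDICT (by name: the statement is the Claim_ definition above) =====
theorem extract_heading_context_spec : Claim_equal_extract_heading_context := by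
  intro lines m _ _
  exact extract_heading_context_spec' lines m
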